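-- pv_equiv track=rewrite | github.com/pythongiant/nocode | parser.py | parse_stream_token
-- ===== SOURCE A (Python) =====
-- def parse_stream_token(
--     token: str,
--     state: dict,
--     thinking_buffer: str,
--     response_buffer: str
-- ) -> tuple:
--     """
--     Parse streaming tokens and separate thinking from response.
--
--     Returns:
--         tuple: (thinking_buffer, response_buffer)
--     """
--     while token:
--
--         if not state["thinking"]:
--
--             start = token.find("<think>")
--
--             if start == -1:
--
--                 response_buffer += token
--                 token = ""
--
--             else:
--
--                 response_buffer += token[:start]
--
--                 token = token[start + len("<think>"):]
--
--                 state["thinking"] = True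
--
--         else:
--
--             end = token.find("</think>")
--
--             if end == -1:
--
--                 thinking_buffer += token
--                 token = ""
--
--             else:
--
--                 thinking_buffer += token[:end]
--
--                 token = token[end + len("</think>"):]
--
--                 state["thinking"] = False
--
--     return thinking_buffer, response_buffer
-- ===== SOURCE B (Python) =====
-- def parse_stream_token(
--     token: str,
--     state: dict,
--     thinking_buffer: str,
--     response_buffer: str
-- ) -> tuple:
--     """
--     Single left-to-right character state machine instead of repeated find/slice.
--     Mutates state["thinking"] like A (B always writes the flag back, A skips the
--     write when token is empty; the stored value is the same either way).
--     """
--     thinking = state["thinking"]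
--     think_chars = []
--     resp_chars = []
--     i = 0
--     n = len(token)
--     while i < n:
--         tag = "</think>" if thinking else "<think>"
--         if token.startswith(tag, i):
--             i += len(tag)
--             thinking = not thinking
--         else:
--             (think_chars if thinking else resp_chars).append(token[i])
--             i += 1
--     state["thinking"] = thinking
--     return thinking_buffer + "".join(think_chars), response_buffer + "".join(resp_chars)
-- ===== Notes on version B (the rewrite author's own statement) =====
-- stated objective: alternative
-- what changed: Replaces A's repeated find/slice/reassign while-loop with a single left-to-right character-level state machine that at each position either consumes the expected tag and flips the flag or emits one character into a per-side list.
-- outside the precondition, e.g. on parse_stream_token('', {}, 'T', 'R'): A returns ('T', 'R'), B raises KeyError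
import Mathlib
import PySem

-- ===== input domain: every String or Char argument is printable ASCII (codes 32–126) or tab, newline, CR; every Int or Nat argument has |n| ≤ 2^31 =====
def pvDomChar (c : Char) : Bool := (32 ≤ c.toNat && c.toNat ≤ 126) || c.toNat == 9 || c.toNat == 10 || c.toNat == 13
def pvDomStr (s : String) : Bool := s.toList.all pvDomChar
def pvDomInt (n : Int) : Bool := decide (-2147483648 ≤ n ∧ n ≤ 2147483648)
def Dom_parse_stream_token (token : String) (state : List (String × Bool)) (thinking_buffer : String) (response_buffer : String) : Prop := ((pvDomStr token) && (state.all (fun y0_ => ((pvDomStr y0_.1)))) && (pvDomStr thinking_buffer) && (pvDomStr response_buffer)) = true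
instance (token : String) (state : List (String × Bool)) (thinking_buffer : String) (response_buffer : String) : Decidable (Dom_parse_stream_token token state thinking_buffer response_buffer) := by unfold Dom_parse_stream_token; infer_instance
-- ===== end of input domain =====

-- B replaces A's repeated find/slice/reassign loop by a single character-level state-machine
-- pass (objective: alternative, same cost). Both Pythons mutate state["thinking"]; the
-- equivalence proved here is about the return value (the stored flag is the same value too).

-- the two tag literals, shared helpers of both ports
def pvOpenTag : List Char := ['<', 't', 'h', 'i', 'n', 'k', '>']
def pvCloseTag : List Char := ['<', '/', 't', 'h', 'i', 'n', 'k', '>']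

-- ===== PORT A =====
-- the while-loop of A: repeatedly find the expected tag, flush the slice before it, drop the tag
def pvALoop (tok : List Char) (thinking : Bool) (tb rb : List Char) : List Char × List Char :=
  if hne : tok = [] then (tb, rb)
  else if thinking = false then
    if h : PySem.Chars.find tok pvOpenTag = -1 then (tb, rb ++ tok)
    else pvALoop (PySem.List.slice tok (some (PySem.Chars.find tok pvOpenTag + 7)) none) true tb
           (rb ++ PySem.List.slice tok none (some (PySem.Chars.find tok pvOpenTag)))
  else
    if h : PySem.Chars.find tok pvCloseTag = -1 then (tb ++ tok, rb)
    else pvALoop (PySem.List.slice tok (some (PySem.Chars.find tok pvCloseTag + 8)) none) false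
           (tb ++ PySem.List.slice tok none (some (PySem.Chars.find tok pvCloseTag))) rb
termination_by tok.length
decreasing_by
  · have h0 := PySem.Chars.neg_one_le_find tok pvOpenTag
    rw [PySem.List.slice_from tok (by omega)]
    have hlen : 0 < tok.length := List.length_pos_iff.mpr hne
    simp only [List.length_drop]
    omega
  · have h0 := PySem.Chars.neg_one_le_find tok pvCloseTag
    rw [PySem.List.slice_from tok (by omega)]
    have hlen : 0 < tok.length := List.length_pos_iff.mpr hne
    simp only [List.length_drop]
    omega

def parse_stream_token (token : String) (state : List (String × Bool)) (thinking_buffer : String) (response_buffer : String) : String × String :=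
  -- state["thinking"]; the .getD false is junk outside Pre_ (Python raises KeyError there)
  let thinking := (state.lookup "thinking").getD false
  let p := pvALoop token.toList thinking thinking_buffer.toList response_buffer.toList
  (String.ofList p.1, String.ofList p.2)

-- ===== PORT B =====
-- the while i < n loop of B: at each position match the expected tag or emit one character
def pvBScan (tok : List Char) (thinking : Bool) (th rs : List Char) : List Char × List Char :=
  match tok with
  | [] => (th, rs)
  | c :: rest =>
    if (if thinking then pvCloseTag else pvOpenTag).isPrefixOf (c :: rest) then
      pvBScan ((c :: rest).drop (if thinking then pvCloseTag else pvOpenTag).length) (!thinking) th rs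
    else if thinking then pvBScan rest thinking (th ++ [c]) rs
    else pvBScan rest thinking th (rs ++ [c])
termination_by tok.length
decreasing_by
  · cases thinking <;> simp [pvOpenTag, pvCloseTag] <;> omega
  · simp
  · simp

def parse_stream_token_alt (token : String) (state : List (String × Bool)) (thinking_buffer : String) (response_buffer : String) : String × String :=
  let thinking := (state.lookup "thinking").getD false
  let p := pvBScan token.toList thinking [] []
  (String.ofList (thinking_buffer.toList ++ p.1), String.ofList (response_buffer.toList ++ p.2))

-- ===== PRECONDITION & SPEC =====
-- Pre_ requires state to carry the "thinking" key: without it Python A raises KeyError as soon as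
-- the loop body runs, and only in the accidental empty-token case (loop never entered) does A
-- still return a value, while B reads the flag up front — that corner is excluded.
def Pre_parse_stream_token (token : String) (state : List (String × Bool)) (thinking_buffer : String) (response_buffer : String) : Prop :=
  (state.lookup "thinking").isSome = true
instance (token : String) (state : List (String × Bool)) (thinking_buffer : String) (response_buffer : String) : Decidable (Pre_parse_stream_token token state thinking_buffer response_buffer) := by unfold Pre_parse_stream_token; infer_instance

def pvWitness_parse_stream_token : String × (List (String × Bool)) × String × String :=
  ("a<think>b</think>c", [("thinking", false)], "T", "R")

def Spec_parse_stream_token (token : String) (state : List (String × Bool)) (thinking_buffer : String) (response_buffer : String) (out : String × String) : Prop := out = parse_stream_token_alt token state thinking_buffer response_buffer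
instance (token : String) (state : List (String × Bool)) (thinking_buffer : String) (response_buffer : String) (out : String × String) : Decidable (Spec_parse_stream_token token state thinking_buffer response_buffer out) := by unfold Spec_parse_stream_token; infer_instance

-- ===== CLAIM (what is proved, stated in full; the proofs are below) =====
def Claim_equal_parse_stream_token : Prop := ∀ (token : String) (state : List (String × Bool)) (thinking_buffer : String) (response_buffer : String), Dom_parse_stream_token token state thinking_buffer response_buffer → Pre_parse_stream_token token state thinking_buffer response_buffer → Spec_parse_stream_token token state thinking_buffer response_buffer (parse_stream_token token state thinking_buffer response_buffer)

-- ===== LEMMAS AND PROOFS =====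

-- the expected tag for a thinking flag
def pvTag (b : Bool) : List Char := if b then pvCloseTag else pvOpenTag

-- accumulator-free core of B's scan
def pvScan (tok : List Char) (b : Bool) : List Char × List Char :=
  match tok with
  | [] => ([], [])
  | c :: rest =>
    if (pvTag b).isPrefixOf (c :: rest) then
      pvScan ((c :: rest).drop (pvTag b).length) (!b)
    else
      let p := pvScan rest b
      if b then (c :: p.1, p.2) else (p.1, c :: p.2)
termination_by tok.length
decreasing_by
  · cases b <;> simp [pvTag, pvOpenTag, pvCloseTag] <;> omega
  · simp

theorem pvTag_length_pos (b : Bool) : 0 < (pvTag b).length := by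
  cases b <;> decide

theorem pvBScan_eq_scan (tok : List Char) (b : Bool) (th rs : List Char) :
    pvBScan tok b th rs = (th ++ (pvScan tok b).1, rs ++ (pvScan tok b).2) := by
  fun_induction pvBScan tok b th rs with
  | case1 b th rs => simp [pvScan]
  | case2 b th rs c rest h ih =>
    simp only [dite_eq_ite] at ih h
    conv_rhs => rw [pvScan]
    simp only [pvTag]
    rw [if_pos h, ih]
  | case3 th rs c rest h ih =>
    simp only [dite_eq_ite] at ih h
    conv_rhs => rw [pvScan]
    simp only [pvTag]
    rw [if_neg h, ih]
    simp
  | case4 b th rs c rest h hb ih =>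
    simp only [dite_eq_ite] at ih h
    have hb' : b = false := by simpa using hb
    subst hb'
    conv_rhs => rw [pvScan]
    simp only [pvTag]
    rw [if_neg h, ih]
    simp

-- no expected tag anywhere: everything goes to the current side
theorem pvScan_no_tag (tok : List Char) (b : Bool) (h : ¬ pvTag b <:+: tok) :
    pvScan tok b = (if b then tok else [], if b then [] else tok) := by
  induction tok with
  | nil => cases b <;> simp [pvScan]
  | cons c rest ih =>
    rw [pvScan]
    have hp : ¬ (pvTag b).isPrefixOf (c :: rest) = true := by
      intro hp
      exact h ((List.isPrefixOf_iff_prefix.mp hp).isInfix)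
    rw [if_neg hp]
    have hrest : ¬ pvTag b <:+: rest := fun hi => h (hi.trans (List.suffix_cons c rest).isInfix)
    rw [ih hrest]
    cases b <;> simp

-- expected tag first occurs at position k: the k characters before it go to the current
-- side, the tag is dropped and the scan continues flipped
theorem pvScan_tag_at (k : Nat) (tok : List Char) (b : Bool)
    (hmin : ∀ i < k, ¬ pvTag b <+: tok.drop i) (hk : pvTag b <+: tok.drop k) :
    pvScan tok b =
      (if b then tok.take k ++ (pvScan (tok.drop (k + (pvTag b).length)) (!b)).1
       else (pvScan (tok.drop (k + (pvTag b).length)) (!b)).1,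
       if b then (pvScan (tok.drop (k + (pvTag b).length)) (!b)).2
       else tok.take k ++ (pvScan (tok.drop (k + (pvTag b).length)) (!b)).2) := by
  induction k generalizing tok with
  | zero =>
    simp only [List.drop_zero] at hk
    have hne : tok ≠ [] := by
      intro h; subst h
      have h1 := pvTag_length_pos b
      have h2 := hk.length_le
      simp at h2
      rw [h2] at h1
      simp at h1
    obtain ⟨c, rest, rfl⟩ := List.exists_cons_of_ne_nil hne
    rw [pvScan]
    rw [if_pos (List.isPrefixOf_iff_prefix.mpr hk)]
    cases b <;> simp
  | succ k ih =>
    have hne : tok ≠ [] := by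
      intro h; subst h
      have h1 := pvTag_length_pos b
      have h2 := hk.length_le
      simp at h2
      rw [h2] at h1
      simp at h1
    obtain ⟨c, rest, rfl⟩ := List.exists_cons_of_ne_nil hne
    rw [pvScan]
    have hp : ¬ (pvTag b).isPrefixOf (c :: rest) = true := by
      intro hp
      exact hmin 0 (Nat.succ_pos k) (by simpa using List.isPrefixOf_iff_prefix.mp hp)
    rw [if_neg hp]
    have hmin' : ∀ i < k, ¬ pvTag b <+: rest.drop i := by
      intro i hi
      have := hmin (i + 1) (by omega)
      simpa using this
    have hk' : pvTag b <+: rest.drop k := by simpa using hk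
    rw [ih rest hmin' hk']
    cases b <;> simp [List.drop_succ_cons, Nat.succ_add]

-- A's loop computes the same split as B's scan, appended to the running buffers
theorem pvALoop_eq_scan (tok : List Char) (b : Bool) (tb rb : List Char) :
    pvALoop tok b tb rb = (tb ++ (pvScan tok b).1, rb ++ (pvScan tok b).2) := by
  fun_induction pvALoop tok b tb rb with
  | case1 b tb rb => simp [pvScan]
  | case2 tok tb rb hne h =>
    have hni : ¬ pvOpenTag <:+: tok := (PySem.Chars.find_eq_neg_one_iff tok pvOpenTag).mp h
    rw [pvScan_no_tag tok false (by simpa [pvTag] using hni)]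
    simp
  | case3 tok tb rb hne h ih =>
    have h0 := PySem.Chars.neg_one_le_find tok pvOpenTag
    have hpos : 0 ≤ PySem.Chars.find tok pvOpenTag := by omega
    obtain ⟨hpre, hmin⟩ := PySem.Chars.find_spec hpos
    rw [pvScan_tag_at (PySem.Chars.find tok pvOpenTag).toNat tok false
      (by simpa [pvTag] using hmin) (by simpa [pvTag] using hpre)]
    have hs1 : PySem.List.slice tok (some (PySem.Chars.find tok pvOpenTag + 7)) none
        = tok.drop ((PySem.Chars.find tok pvOpenTag).toNat + (pvTag false).length) := by
      rw [PySem.List.slice_from tok (by omega)]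
      congr 1
      have hlen : (pvTag false).length = 7 := rfl
      rw [hlen]
      omega
    have hs2 : PySem.List.slice tok none (some (PySem.Chars.find tok pvOpenTag))
        = tok.take (PySem.Chars.find tok pvOpenTag).toNat := PySem.List.slice_to tok hpos
    rw [hs1, hs2] at ih ⊢
    rw [ih]
    simp
  | case4 tok b tb rb hne hb h =>
    have hni : ¬ pvCloseTag <:+: tok := (PySem.Chars.find_eq_neg_one_iff tok pvCloseTag).mp h
    have hb' : b = true := by cases b <;> simp_all
    subst hb'
    rw [pvScan_no_tag tok true (by simpa [pvTag] using hni)]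
    simp
  | case5 tok b tb rb hne hb h ih =>
    have hb' : b = true := by cases b <;> simp_all
    subst hb'
    have h0 := PySem.Chars.neg_one_le_find tok pvCloseTag
    have hpos : 0 ≤ PySem.Chars.find tok pvCloseTag := by omega
    obtain ⟨hpre, hmin⟩ := PySem.Chars.find_spec hpos
    rw [pvScan_tag_at (PySem.Chars.find tok pvCloseTag).toNat tok true
      (by simpa [pvTag] using hmin) (by simpa [pvTag] using hpre)]
    have hs1 : PySem.List.slice tok (some (PySem.Chars.find tok pvCloseTag + 8)) none
        = tok.drop ((PySem.Chars.find tok pvCloseTag).toNat + (pvTag true).length) := by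
      rw [PySem.List.slice_from tok (by omega)]
      congr 1
      have hlen : (pvTag true).length = 8 := rfl
      rw [hlen]
      omega
    have hs2 : PySem.List.slice tok none (some (PySem.Chars.find tok pvCloseTag))
        = tok.take (PySem.Chars.find tok pvCloseTag).toNat := PySem.List.slice_to tok hpos
    rw [hs1, hs2] at ih ⊢
    rw [ih]
    simp

-- ===== VERDICT (by name: the statement is the Claim_ definition above) =====
theorem parse_stream_token_spec : Claim_equal_parse_stream_token := by
  intro token state thinking_buffer response_buffer _hdom _hpre
  show parse_stream_token token state thinking_buffer response_buffer
      = parse_stream_token_alt token state thinking_buffer response_buffer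
  simp only [parse_stream_token, parse_stream_token_alt, pvALoop_eq_scan, pvBScan_eq_scan,
    List.nil_append]
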